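-- pv_equiv track=rewrite | github.com/dudtj5307/Coding_skills | 프로그래머스/3/150367. 표현 가능한 이진트리/표현 가능한 이진트리.py | solution
-- ===== SOURCE A (Python) =====
-- def solution(numbers):
--     def inspect(i, b_num):
--         if numbers[i] and (m_idx := (len(b_num)//2)):
--             if b_num[m_idx] == '0' and ('1' in b_num):
--                 numbers[i] = 0
--             else:
--                 inspect(i, b_num[:m_idx]), inspect(i, b_num[m_idx+1:])
--
--     for i, num in enumerate(numbers):
--         b_num, numbers[i] = bin(num)[2:], 1
--         j, tree = 1, 1
--         while len(b_num) > tree: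
--             tree += 2 ** j
--             j += 1
--         b_num = b_num.rjust(tree, '0')
--         inspect(i, b_num)
--     return numbers
-- ===== SOURCE B (Python) =====
-- def solution(numbers):
--     for i, num in enumerate(numbers):
--         b = bin(num)[2:]
--         size = (1 << len(b).bit_length()) - 1   # smallest 2^k - 1 >= len(b), closed form
--         b = b.rjust(size, '0')
--         ok = 1
--         stack = [b]
--         while stack:
--             seg = stack.pop()
--             m = len(seg) // 2
--             if ok and m:
--                 if seg[m] == '0' and '1' in seg:
--                     ok = 0
--                 else:
--                     stack.append(seg[:m])
--                     stack.append(seg[m + 1:])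
--         numbers[i] = ok
--     return numbers
-- ===== Notes on version B (the rewrite author's own statement) =====
-- stated objective: alternative
-- what changed: B keeps the midpoint-split validity test but replaces A's recursive inspect with an explicit stack loop and replaces A's tree-size doubling while-loop with the closed form (1 << len.bit_length()) - 1.
import Mathlib
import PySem

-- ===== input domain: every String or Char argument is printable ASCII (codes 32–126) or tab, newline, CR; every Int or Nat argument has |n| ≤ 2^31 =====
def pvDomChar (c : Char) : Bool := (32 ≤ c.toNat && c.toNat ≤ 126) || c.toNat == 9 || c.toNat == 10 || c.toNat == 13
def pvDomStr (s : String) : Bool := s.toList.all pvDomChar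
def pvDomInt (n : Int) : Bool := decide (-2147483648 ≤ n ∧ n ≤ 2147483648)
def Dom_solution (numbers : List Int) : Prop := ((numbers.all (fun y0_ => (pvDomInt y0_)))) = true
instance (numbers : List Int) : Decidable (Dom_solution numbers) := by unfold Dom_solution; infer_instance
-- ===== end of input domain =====

-- B replaces A's recursion with an explicit stack and A's padded-size doubling loop with a
-- bit_length closed form (objective: alternative decomposition; same return values).
-- Both A and B mutate `numbers` in place identically; the theorems are about the return value.


-- ===== PORT A =====
-- shared helper: bin(n)[2:] as a list of chars (for n < 0 this is 'b' followed by the digits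
-- of |n|, exactly Python's '-0b101'[2:] == 'b101'); the first argument is fuel making the
-- halving recursion structural — fuel = n always suffices (the value halves each step)
def binAuxF : Nat → Nat → List Char
  | 0, _ => []
  | f + 1, n => if n = 0 then [] else binAuxF f (n / 2) ++ [if n % 2 = 1 then '1' else '0']

def binNat (n : Nat) : List Char := if n = 0 then ['0'] else binAuxF n n

def pyBinTail (n : Int) : List Char :=
  if n < 0 then 'b' :: binNat (-n).toNat else binNat n.toNat

-- shared helper: s.rjust(t, '0')
def pyRjust (b : List Char) (t : Nat) : List Char := List.replicate (t - b.length) '0' ++ b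

-- A's while loop computing the padded tree size; first argument is fuel (fuel = L suffices:
-- tree reaches 2^fuel - 1 ≥ L within fuel iterations)
def treeLoopA : Nat → Nat → Nat → Nat → Nat
  | 0, _, _, tree => tree
  | f + 1, L, j, tree => if tree < L then treeLoopA f L (j + 1) (tree + 2 ^ j) else tree

-- A's recursive `inspect`, with numbers[i] threaded as the state v; fuel = b.length suffices
-- (each recursive call strictly shortens the segment)
def inspectAF : Nat → List Char → Int → Int
  | 0, _, v => v
  | f + 1, b, v =>
    if v ≠ 0 ∧ b.length / 2 ≠ 0 then
      if b[b.length / 2]? = some '0' ∧ '1' ∈ b then 0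
      else inspectAF f (b.drop (b.length / 2 + 1)) (inspectAF f (b.take (b.length / 2)) v)
    else v

def solution (numbers : List Int) : List Int :=
  numbers.map (fun num =>
    let b := pyBinTail num
    let tree := treeLoopA b.length b.length 1 1
    inspectAF (pyRjust b tree).length (pyRjust b tree) 1)

-- ===== PORT B =====
-- B's explicit stack loop (head of the list is the top of the stack); fuel = the sum of
-- 2*len+1 over the stack suffices (each pop strictly decreases that sum)
def loopBF : Nat → List (List Char) → Int → Int
  | 0, _, ok => ok
  | f + 1, stack, ok =>
    match stack with
    | [] => ok
    | seg :: rest =>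
      if ok ≠ 0 ∧ seg.length / 2 ≠ 0 then
        if seg[seg.length / 2]? = some '0' ∧ '1' ∈ seg then loopBF f rest 0
        else loopBF f (seg.drop (seg.length / 2 + 1) :: seg.take (seg.length / 2) :: rest) ok
      else loopBF f rest ok

def solution_alt (numbers : List Int) : List Int :=
  numbers.map (fun num =>
    let b := pyBinTail num
    let size := 2 ^ (Nat.size b.length) - 1
    let stack := [pyRjust b size]
    loopBF ((stack.map (fun s => 2 * s.length + 1)).sum) stack 1)

-- ===== PRECONDITION & SPEC =====
def Spec_solution (numbers : List Int) (out : List Int) : Prop := out = solution_alt numbers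
instance (numbers : List Int) (out : List Int) : Decidable (Spec_solution numbers out) := by unfold Spec_solution; infer_instance

-- ===== CLAIM (what is proved, stated in full; the proofs are below) =====
def Claim_equal_solution : Prop := ∀ (numbers : List Int), Dom_solution numbers → Spec_solution numbers (solution numbers)

-- ===== LEMMAS AND PROOFS =====

-- "this segment contains an invalid node" — the common characterisation of both traversals
def badSeg (b : List Char) : Bool :=
  if b.length / 2 = 0 then false
  else if b[b.length / 2]? = some '0' ∧ '1' ∈ b then true
  else badSeg (b.take (b.length / 2)) || badSeg (b.drop (b.length / 2 + 1))
termination_by b.length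
decreasing_by
  · simp only [List.length_take]; omega
  · simp only [List.length_drop]; omega

theorem binNat_length_pos (n : Nat) : 1 ≤ (binNat n).length := by
  unfold binNat
  split
  · simp
  · rename_i hn
    cases n with
    | zero => omega
    | succ k => rw [binAuxF, if_neg hn]; simp

theorem pyBinTail_length_pos (n : Int) : 1 ≤ (pyBinTail n).length := by
  unfold pyBinTail
  split
  · simp
  · exact binNat_length_pos _

theorem badSeg_true (b : List Char) (hm : b.length / 2 ≠ 0)
    (hbad : b[b.length / 2]? = some '0' ∧ '1' ∈ b) : badSeg b = true := by
  rw [badSeg, if_neg hm, if_pos hbad]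

theorem badSeg_split (b : List Char) (hm : b.length / 2 ≠ 0)
    (hbad : ¬(b[b.length / 2]? = some '0' ∧ '1' ∈ b)) :
    badSeg b = (badSeg (b.take (b.length / 2)) || badSeg (b.drop (b.length / 2 + 1))) := by
  rw [badSeg, if_neg hm, if_neg hbad]

theorem badSeg_false (b : List Char) (hm : b.length / 2 = 0) : badSeg b = false := by
  rw [badSeg, if_pos hm]

theorem treeLoopA_eq (f : Nat) : ∀ j, Nat.size L ≤ j + f →
    treeLoopA f L j (2 ^ j - 1) = 2 ^ (max j (Nat.size L)) - 1 := by
  induction f with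
  | zero =>
    intro j hj
    rw [treeLoopA]
    have : max j (Nat.size L) = j := by omega
    rw [this]
  | succ f ih =>
    intro j hj
    rw [treeLoopA]
    have h1 : 1 ≤ (2:Nat) ^ j := Nat.one_le_two_pow
    split
    · rename_i hlt
      have h2 : 2 ^ j - 1 + 2 ^ j = 2 ^ (j + 1) - 1 := by rw [pow_succ]; omega
      rw [h2, ih (j + 1) (by omega)]
      have h3 : j < Nat.size L := Nat.lt_size.mpr (by omega)
      have h4 : max (j + 1) (Nat.size L) = max j (Nat.size L) := by omega
      rw [h4]
    · rename_i hge
      have h2 : Nat.size L ≤ j := Nat.size_le.mpr (by omega)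
      have h3 : max j (Nat.size L) = j := by omega
      rw [h3]

theorem inspectAF_eq (f : Nat) : ∀ (b : List Char) (v : Int), b.length ≤ f →
    inspectAF f b v = if v ≠ 0 ∧ ¬ badSeg b then v else 0 := by
  induction f with
  | zero =>
    intro b v hb
    have : b = [] := List.eq_nil_of_length_eq_zero (by omega)
    subst this
    rw [inspectAF, badSeg_false [] (by simp)]
    by_cases hv : v = 0 <;> simp [hv]
  | succ f ih =>
    intro b v hb
    rw [inspectAF]
    by_cases hv : v = 0
    · simp [hv]
    · by_cases hm : b.length / 2 = 0
      · simp [hv, hm, badSeg_false b hm]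
      · rw [if_pos ⟨hv, hm⟩]
        by_cases hbad : b[b.length / 2]? = some '0' ∧ '1' ∈ b
        · rw [if_pos hbad]
          simp [badSeg_true b hm hbad]
        · rw [if_neg hbad]
          rw [ih (b.take (b.length / 2)) v (by simp only [List.length_take]; omega)]
          rw [ih (b.drop (b.length / 2 + 1)) _ (by simp only [List.length_drop]; omega)]
          rw [badSeg_split b hm hbad]
          by_cases h1 : badSeg (b.take (b.length / 2)) <;>
            by_cases h2 : badSeg (b.drop (b.length / 2 + 1)) <;>
            simp [h1, h2, hv]

theorem loopBF_eq (f : Nat) : ∀ (stack : List (List Char)) (ok : Int),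
    (stack.map (fun s => 2 * s.length + 1)).sum ≤ f →
    loopBF f stack ok = if ok ≠ 0 ∧ ∀ s ∈ stack, ¬ badSeg s then ok else 0 := by
  induction f with
  | zero =>
    intro stack ok hs
    cases stack with
    | nil =>
      rw [loopBF]
      by_cases hok : ok = 0 <;> simp [hok]
    | cons seg rest => simp at hs
  | succ f ih =>
    intro stack ok hs
    cases stack with
    | nil =>
      rw [loopBF]
      by_cases hok : ok = 0 <;> simp [hok]
    | cons seg rest =>
      simp only [List.map_cons, List.sum_cons] at hs
      rw [loopBF]
      by_cases hok : ok = 0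
      · simp only [hok, ne_eq, not_true_eq_false, false_and, if_false]
        rw [ih rest 0 (by omega)]
        simp
      · by_cases hm : seg.length / 2 = 0
        · rw [if_neg (by tauto), ih rest ok (by omega)]
          simp [badSeg_false seg hm]
        · rw [if_pos ⟨hok, hm⟩]
          by_cases hbad : seg[seg.length / 2]? = some '0' ∧ '1' ∈ seg
          · rw [if_pos hbad, ih rest 0 (by omega)]
            simp [badSeg_true seg hm hbad]
          · rw [if_neg hbad]
            rw [ih _ ok (by
              simp only [List.map_cons, List.sum_cons, List.length_take, List.length_drop]
              omega)]
            have hb := badSeg_split seg hm hbad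
            simp only [List.forall_mem_cons, hb]
            by_cases h1 : badSeg (seg.take (seg.length / 2)) <;>
              by_cases h2 : badSeg (seg.drop (seg.length / 2 + 1)) <;>
              simp [h1, h2, hok]

theorem elem_eq (num : Int) :
    inspectAF (pyRjust (pyBinTail num) (treeLoopA (pyBinTail num).length (pyBinTail num).length 1 1)).length
      (pyRjust (pyBinTail num) (treeLoopA (pyBinTail num).length (pyBinTail num).length 1 1)) 1 =
    loopBF (([pyRjust (pyBinTail num) (2 ^ (Nat.size (pyBinTail num).length) - 1)].map
        (fun s => 2 * s.length + 1)).sum)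
      [pyRjust (pyBinTail num) (2 ^ (Nat.size (pyBinTail num).length) - 1)] 1 := by
  have hL := pyBinTail_length_pos num
  have hsz : Nat.size (pyBinTail num).length ≤ 1 + (pyBinTail num).length := by
    have := Nat.size_le.mpr (show (pyBinTail num).length < 2 ^ (1 + (pyBinTail num).length) from
      lt_of_lt_of_le (Nat.lt_two_pow_self) (Nat.pow_le_pow_right (by omega) (by omega)))
    omega
  have htree : treeLoopA (pyBinTail num).length (pyBinTail num).length 1 1 =
      2 ^ (Nat.size (pyBinTail num).length) - 1 := by
    have h := treeLoopA_eq (L := (pyBinTail num).length) (pyBinTail num).length 1 (by omega)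
    have hs : 1 ≤ Nat.size (pyBinTail num).length :=
      Nat.size_pos.mpr (by omega)
    simpa [Nat.max_eq_right hs] using h
  rw [htree, inspectAF_eq _ _ _ (le_refl _),
    loopBF_eq _ _ _ (le_refl _)]
  simp

theorem solution_eq_alt (numbers : List Int) : solution numbers = solution_alt numbers := by
  unfold solution solution_alt
  exact List.map_congr_left (fun num _ => elem_eq num)

-- ===== VERDICT (by name: the statement is the Claim_ definition above) =====
theorem solution_spec : Claim_equal_solution := by
  intro numbers _
  unfold Spec_solution
  exact solution_eq_alt numbers
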